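-- pv_equiv track=rewrite | github.com/odelalleau/PLearn | python_modules/plearn/utilities/Tutorial.py | dedent
-- ===== SOURCE A (Python) =====
-- def dedent( s, itoken = ' '*4 ):
--     lines = s.split('\n')
--
--     dedented = []
--     itklen   = len( itoken )
--     for line in lines:
--         if line.startswith( itoken ):
--             dedented.append( line[itklen:] )
--         else:
--             dedented.append( line )
--     return '\n'.join( dedented )
-- ===== SOURCE B (Python) =====
-- def dedent(s, itoken=' '*4):
--     # A token containing a newline can never be a prefix of a (newline-free) line,
--     # and the empty token changes nothing.
--     if not itoken or '\n' in itoken: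
--         return s
--     head = s[len(itoken):] if s.startswith(itoken) else s
--     return head.replace('\n' + itoken, '\n')
-- ===== Notes on version B (the rewrite author's own statement) =====
-- stated objective: simpler
-- what changed: Replaces the split-into-lines / per-line loop / join pipeline with no line list at all: strip itoken once at the string head, then a single str.replace of '\n'+itoken by '\n' (a token containing '\n' or the empty token leaves the string unchanged, so those return s directly).
import Mathlib
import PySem

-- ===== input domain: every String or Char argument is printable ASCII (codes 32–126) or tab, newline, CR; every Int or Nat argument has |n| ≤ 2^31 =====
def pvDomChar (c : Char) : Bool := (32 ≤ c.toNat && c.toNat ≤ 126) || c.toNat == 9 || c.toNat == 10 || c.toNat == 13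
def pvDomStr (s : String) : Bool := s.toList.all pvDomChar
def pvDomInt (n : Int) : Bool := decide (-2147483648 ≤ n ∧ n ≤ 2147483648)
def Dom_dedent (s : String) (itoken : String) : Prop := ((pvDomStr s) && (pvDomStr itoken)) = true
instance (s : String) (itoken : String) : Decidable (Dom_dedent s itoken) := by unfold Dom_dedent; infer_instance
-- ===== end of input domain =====

-- B builds no line list: it strips itoken once at the string head and removes every
-- "\n"+itoken occurrence with a single replace.

-- ===== PORT A =====
def dedent (s : String) (itoken : String) : String :=
  let lines := (PySem.Str.split? s "\n").getD []
  let itklen : Int := PySem.Str.len itoken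
  let dedented : List String := lines.foldl (fun acc line =>
    if PySem.Str.startswith line itoken then acc ++ [PySem.Str.slice line (some itklen) none]
    else acc ++ [line]) []
  PySem.Str.join "\n" dedented

-- ===== PORT B =====
def dedent_alt (s : String) (itoken : String) : String :=
  if PySem.Str.len itoken == 0 || PySem.Str.isIn "\n" itoken then s
  else
    let head := if PySem.Str.startswith s itoken then
        PySem.Str.slice s (some (PySem.Str.len itoken)) none else s
    PySem.Str.replace head ("\n" ++ itoken) "\n"

-- ===== PRECONDITION & SPEC =====
def Spec_dedent (s : String) (itoken : String) (out : String) : Prop := out = dedent_alt s itoken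
instance (s : String) (itoken : String) (out : String) : Decidable (Spec_dedent s itoken out) := by unfold Spec_dedent; infer_instance

-- ===== CLAIM (what is proved, stated in full; the proofs are below) =====
def Claim_equal_dedent : Prop := ∀ (s : String) (itoken : String), Dom_dedent s itoken → Spec_dedent s itoken (dedent s itoken)

-- ===== LEMMAS AND PROOFS =====

/-- First line of `cs` (up to the first `'\n'`), and the rest after that `'\n'` if any. -/
def pvLine : List Char → List Char × Option (List Char)
  | [] => ([], none)
  | c :: rest => if c = '\n' then ([], some rest)
      else ((pvLine rest).1.cons c, (pvLine rest).2)

/-- `cs.split('\n')` as a plain structural recursion. -/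
def pvSplit : List Char → List (List Char)
  | [] => [[]]
  | c :: rest => if c = '\n' then [] :: pvSplit rest else (pvSplit rest).modifyHead (c :: ·)

/-- A's per-line transformation. -/
def pvF (t line : List Char) : List Char := if t.isPrefixOf line then line.drop t.length else line

/-- First line unchanged, every later line dedented, joined back. -/
def pvJoinTail (t : List Char) (pieces : List (List Char)) : List Char :=
  match pieces with
  | [] => []
  | l :: ls => PySem.Chars.join ['\n'] (l :: ls.map (pvF t))

theorem pvSplit_ne_nil (cs : List Char) : pvSplit cs ≠ [] := by
  cases cs with
  | nil => simp [pvSplit]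
  | cons c rest =>
    simp only [pvSplit]
    split
    · simp
    · cases h : pvSplit rest with
      | nil => exact absurd h (pvSplit_ne_nil rest)
      | cons a as => simp [h]

theorem pvSplit_eq_pvLine (cs : List Char) :
    pvSplit cs = match pvLine cs with
      | (l, none) => [l]
      | (l, some r) => l :: pvSplit r := by
  induction cs with
  | nil => simp [pvSplit, pvLine]
  | cons c rest ih =>
    by_cases hc : c = '\n'
    · simp [pvSplit, pvLine, hc]
    · simp only [pvSplit, pvLine, if_neg hc, ih]
      cases h : pvLine rest with
      | mk l r => cases r <;> simp

theorem pvLine_no_nl (cs : List Char) : '\n' ∉ (pvLine cs).1 := by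
  induction cs with
  | nil => simp [pvLine]
  | cons c rest ih =>
    by_cases hc : c = '\n'
    · simp [pvLine, hc]
    · simp [pvLine, hc, ih, Ne.symm hc]

theorem pvSplit_no_nl (cs l : List Char) (hl : l ∈ pvSplit cs) : '\n' ∉ l := by
  induction cs generalizing l with
  | nil => simp [pvSplit] at hl; simp [hl]
  | cons c rest ih =>
    by_cases hc : c = '\n'
    · simp [pvSplit, hc] at hl
      rcases hl with h | h
      · simp [h]
      · exact ih l h
    · simp only [pvSplit, if_neg hc] at hl
      cases h : pvSplit rest with
      | nil => exact absurd h (pvSplit_ne_nil rest)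
      | cons a as =>
        rw [h] at hl
        simp only [List.modifyHead_cons, List.mem_cons] at hl
        rcases hl with h' | h'
        · subst h'
          intro hm
          rcases List.mem_cons.mp hm with h'' | h''
          · exact hc h''.symm
          · exact ih a (h ▸ List.mem_cons_self) h''
        · exact ih l (h ▸ List.mem_cons_of_mem a h')

theorem pvJoin_pvSplit (cs : List Char) : PySem.Chars.join ['\n'] (pvSplit cs) = cs := by
  induction cs with
  | nil => simp only [pvSplit]; rw [PySem.Chars.join_singleton]
  | cons c rest ih =>
    cases h : pvSplit rest with
    | nil => exact absurd h (pvSplit_ne_nil rest)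
    | cons a as =>
      rw [h] at ih
      by_cases hc : c = '\n'
      · subst hc
        simp only [pvSplit, eq_self_iff_true, if_true, h]
        rw [PySem.Chars.join_cons_cons]
        simp [ih]
      · simp only [pvSplit, if_neg hc, h, List.modifyHead_cons]
        cases as with
        | nil =>
          rw [PySem.Chars.join_singleton] at ih
          rw [PySem.Chars.join_singleton, ih]
        | cons b bs =>
          rw [PySem.Chars.join_cons_cons] at ih ⊢
          rw [← ih]
          simp

theorem pvIntercalate_singleton (p : List Char) :
    (['\n'] : List Char).intercalate [p] = p := PySem.Chars.join_singleton ['\n'] p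

theorem pvSplitOn_go_spec : ∀ (fuel : Nat) (cs cur : List Char) (acc : List (List Char)),
    cs.length < fuel →
    PySem.Chars.splitOn.go ['\n'] fuel cs cur acc
      = acc.reverse ++ (pvSplit cs).modifyHead (cur.reverse ++ ·) := by
  intro fuel
  induction fuel with
  | zero => intro cs cur acc h; omega
  | succ F ih =>
    intro cs cur acc h
    cases cs with
    | nil =>
      rw [PySem.Chars.splitOn.go.eq_def]
      simp [pvSplit]
    | cons c rest =>
      rw [PySem.Chars.splitOn.go.eq_def]
      simp only []
      by_cases hc : c = '\n'
      · subst hc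
        rw [if_pos (by simp [List.isPrefixOf])]
        have hd : List.drop (['\n'] : List Char).length ('\n' :: rest) = rest := rfl
        rw [hd]
        rw [ih rest [] _ (by simpa using Nat.lt_of_succ_lt_succ h)]
        simp only [pvSplit, eq_self_iff_true, if_true]
        cases hs : pvSplit rest <;> simp
      · rw [if_neg (by simp [List.isPrefixOf]; exact fun h' => hc h'.symm)]
        rw [ih rest (c :: cur) acc (by simpa using Nat.lt_of_succ_lt_succ h)]
        simp only [pvSplit, if_neg hc]
        cases hs : pvSplit rest with
        | nil => exact absurd hs (pvSplit_ne_nil rest)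
        | cons a as => simp

theorem pvSplitOn_eq (cs : List Char) : PySem.Chars.splitOn cs ['\n'] = pvSplit cs := by
  unfold PySem.Chars.splitOn
  rw [pvSplitOn_go_spec (cs.length + 1) cs [] [] (Nat.lt_succ_self _)]
  cases h : pvSplit cs with
  | nil => exact absurd h (pvSplit_ne_nil cs)
  | cons a as => simp

theorem pvPrefix_line (t : List Char) (hnl : '\n' ∉ t) :
    ∀ cs : List Char, t.isPrefixOf cs = t.isPrefixOf (pvLine cs).1 := by
  intro cs
  induction cs generalizing t with
  | nil => cases t <;> simp [pvLine, List.isPrefixOf]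
  | cons c rest ih =>
    cases t with
    | nil => simp [List.isPrefixOf]
    | cons a t' =>
      by_cases hc : c = '\n'
      · subst hc
        have ha : a ≠ '\n' := fun h => hnl (h ▸ List.mem_cons_self)
        simp only [pvLine, if_pos rfl]
        show (a :: t').isPrefixOf ('\n' :: rest) = (a :: t').isPrefixOf []
        simp [List.isPrefixOf, ha]
      · simp only [pvLine, if_neg hc]
        simp only [List.isPrefixOf]
        by_cases hac : a == c
        · simp [hac, ih t' (fun h => hnl (List.mem_cons_of_mem a h))]
        · simp [hac]

theorem pvLine_append_no_nl (l r : List Char) (hl : '\n' ∉ l) :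
    pvLine (l ++ '\n' :: r) = (l, some r) := by
  induction l with
  | nil => simp [pvLine]
  | cons c l' ih =>
    have hc : c ≠ '\n' := fun h => hl (h ▸ List.mem_cons_self)
    simp only [List.cons_append, pvLine, if_neg hc]
    rw [ih (fun h => hl (List.mem_cons_of_mem c h))]

theorem pvLine_no_nl_self (l : List Char) (hl : '\n' ∉ l) : pvLine l = (l, none) := by
  induction l with
  | nil => rfl
  | cons c l' ih =>
    have hc : c ≠ '\n' := fun h => hl (h ▸ List.mem_cons_self)
    simp only [pvLine, if_neg hc]
    rw [ih (fun h => hl (List.mem_cons_of_mem c h))]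

theorem pvLine_decomp (cs : List Char) :
    cs = (pvLine cs).1 ++ (match (pvLine cs).2 with | none => [] | some r => '\n' :: r) := by
  induction cs with
  | nil => rfl
  | cons c rest ih =>
    by_cases hc : c = '\n'
    · simp [pvLine, hc]
    · simp only [pvLine, if_neg hc]
      cases h : pvLine rest with
      | mk l r =>
        rw [h] at ih
        cases r <;> simpa using ih

theorem pvLine_pvF (t cs : List Char) (hnl : '\n' ∉ t) :
    pvLine (pvF t cs) = (pvF t (pvLine cs).1, (pvLine cs).2) := by
  by_cases hp : t.isPrefixOf cs
  · have hpl : t.isPrefixOf (pvLine cs).1 := by rw [← pvPrefix_line t hnl cs]; exact hp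
    have hple : t.length ≤ (pvLine cs).1.length :=
      (List.isPrefixOf_iff_prefix.mp hpl).length_le
    have hdl : '\n' ∉ (pvLine cs).1.drop t.length :=
      fun h => pvLine_no_nl cs (List.mem_of_mem_drop h)
    unfold pvF
    rw [if_pos hp, if_pos hpl]
    conv_lhs => rw [pvLine_decomp cs]
    cases hr : (pvLine cs).2 with
    | none =>
      simp only [List.append_nil]
      exact pvLine_no_nl_self _ hdl
    | some r =>
      rw [List.drop_append_of_le_length hple]
      exact pvLine_append_no_nl _ r hdl
  · have hpl : ¬ t.isPrefixOf (pvLine cs).1 := by rw [← pvPrefix_line t hnl cs]; exact hp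
    unfold pvF
    rw [if_neg hp, if_neg hpl]

theorem pvSplit_strip (t cs : List Char) (hnl : '\n' ∉ t) :
    pvSplit (pvF t cs) = (pvSplit cs).modifyHead (pvF t) := by
  rw [pvSplit_eq_pvLine (pvF t cs), pvSplit_eq_pvLine cs]
  rw [pvLine_pvF t cs hnl]
  cases h : pvLine cs with
  | mk l r => cases r <;> simp

theorem pvReplace_go_spec (t : List Char) (hnl : '\n' ∉ t) :
    ∀ (fuel : Nat) (cs acc : List Char), cs.length ≤ fuel →
    PySem.Chars.replace.go ('\n' :: t) ['\n'] fuel cs acc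
      = acc.reverse ++ pvJoinTail t (pvSplit cs) := by
  intro fuel
  induction fuel with
  | zero =>
    intro cs acc h
    have : cs = [] := List.length_eq_zero_iff.mp (Nat.le_zero.mp h)
    subst this
    have hb : pvJoinTail t (pvSplit []) = [] := by
      simp only [pvSplit, pvJoinTail, List.map_nil]
      exact pvIntercalate_singleton []
    rw [PySem.Chars.replace.go.eq_def]
    simp [hb]
  | succ F ih =>
    intro cs acc h
    cases cs with
    | nil =>
      rw [PySem.Chars.replace.go.eq_def]
      simp only [pvSplit, pvJoinTail, List.map_nil]
      simp [pvIntercalate_singleton]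
    | cons c rest =>
      rw [PySem.Chars.replace.go.eq_def]
      simp only []
      have hlen : rest.length ≤ F := by simpa using Nat.le_of_succ_le_succ h
      by_cases hm : ('\n' :: t).isPrefixOf (c :: rest) = true
      · rw [if_pos hm]
        simp only [List.isPrefixOf, Bool.and_eq_true, beq_iff_eq] at hm
        obtain ⟨hc, hpr⟩ := hm
        subst hc
        have : List.drop ('\n' :: t).length ('\n' :: rest) = rest.drop t.length := by simp
        rw [this]
        rw [ih (rest.drop t.length) _ (le_trans (by simp) hlen)]
        have hstep : pvSplit (rest.drop t.length) = (pvSplit rest).modifyHead (pvF t) := by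
          have : rest.drop t.length = pvF t rest := by unfold pvF; rw [if_pos hpr]
          rw [this, pvSplit_strip t rest hnl]
        rw [hstep]
        simp only [pvSplit, eq_self_iff_true, if_true]
        cases hs : pvSplit rest with
        | nil => exact absurd hs (pvSplit_ne_nil rest)
        | cons a as =>
          simp only [List.modifyHead_cons, pvJoinTail, List.map_cons]
          rw [PySem.Chars.join_cons_cons]
          simp
      · rw [if_neg hm]
        rw [ih rest (c :: acc) hlen]
        simp only [List.isPrefixOf, Bool.and_eq_true, beq_iff_eq] at hm
        push_neg at hm
        have hgoal : pvJoinTail t (pvSplit (c :: rest)) = c :: pvJoinTail t (pvSplit rest) := by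
          by_cases hc : c = '\n'
          · subst hc
            have hpr : ¬ t.isPrefixOf rest = true := hm rfl
            simp only [pvSplit, eq_self_iff_true, if_true]
            cases hs : pvSplit rest with
            | nil => exact absurd hs (pvSplit_ne_nil rest)
            | cons a as =>
              have hfa : pvF t a = a := by
                unfold pvF
                rw [if_neg (by
                  rw [pvPrefix_line t hnl rest] at hpr
                  rw [pvSplit_eq_pvLine rest] at hs
                  intro hq
                  apply hpr
                  cases hl : pvLine rest with
                  | mk l r =>
                    rw [hl] at hs
                    cases r <;> simp_all)]
              simp only [pvJoinTail, List.map_cons, hfa]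
              rw [PySem.Chars.join_cons_cons]
              simp
          · simp only [pvSplit, if_neg hc]
            cases hs : pvSplit rest with
            | nil => exact absurd hs (pvSplit_ne_nil rest)
            | cons a as =>
              simp only [List.modifyHead_cons, pvJoinTail]
              cases as with
              | nil => simp [pvIntercalate_singleton]
              | cons b bs =>
                rw [List.map_cons, PySem.Chars.join_cons_cons, PySem.Chars.join_cons_cons]
                simp
        rw [hgoal]
        simp

theorem pvLineG_toList (x itoken : String) :
    (if PySem.Str.startswith x itoken then
        PySem.Str.slice x (some (PySem.Str.len itoken)) none else x).toList
      = pvF itoken.toList x.toList := by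
  unfold pvF
  by_cases hp : itoken.toList.isPrefixOf x.toList
  · rw [if_pos (by simp [PySem.Str.startswith, PySem.Chars.startswith, hp]),
        if_pos hp]
    rw [PySem.Str.toList_slice]
    simp only [PySem.Chars.slice_eq_listSlice]
    rw [PySem.Str.len]
    rw [PySem.List.slice_from _ (by positivity)]
    simp
  · rw [if_neg (by simp [PySem.Str.startswith, PySem.Chars.startswith, hp]),
        if_neg hp]

theorem pvDedent_toList (s itoken : String) :
    (dedent s itoken).toList
      = PySem.Chars.join ['\n'] ((pvSplit s.toList).map (pvF itoken.toList)) := by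
  unfold dedent
  have hsplit : PySem.Str.split? s "\n" = some ((pvSplit s.toList).map String.ofList) := by
    unfold PySem.Str.split? PySem.Chars.split?
    have : ("\n" : String).toList = ['\n'] := by decide
    rw [this]
    simp [pvSplitOn_eq]
  rw [hsplit]
  simp only [Option.getD_some]
  have hfold : ∀ (ls : List String) (acc : List String),
      ls.foldl (fun acc line =>
        if PySem.Str.startswith line itoken then
          acc ++ [PySem.Str.slice line (some (PySem.Str.len itoken)) none]
        else acc ++ [line]) acc
      = acc ++ ls.map (fun line =>
          if PySem.Str.startswith line itoken then
            PySem.Str.slice line (some (PySem.Str.len itoken)) none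
          else line) := by
    intro ls
    induction ls with
    | nil => simp
    | cons a as ih =>
      intro acc
      simp only [List.foldl_cons, List.map_cons]
      by_cases hp : PySem.Str.startswith a itoken
      · rw [if_pos hp, ih, if_pos hp]; simp
      · rw [if_neg hp, ih, if_neg hp]; simp
  rw [hfold]
  rw [PySem.Str.toList_join]
  have : ("\n" : String).toList = ['\n'] := by decide
  rw [this]
  simp only [List.nil_append, List.map_map]
  congr 1
  apply List.map_congr_left
  intro p _
  simp only [Function.comp_apply, String.toList_ofList]
  rw [pvLineG_toList (String.ofList p) itoken]
  rw [String.toList_ofList]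

theorem pvId_of_no_strip (t cs : List Char) (hid : ∀ l ∈ pvSplit cs, pvF t l = l) :
    PySem.Chars.join ['\n'] ((pvSplit cs).map (pvF t)) = cs := by
  rw [List.map_congr_left hid, List.map_id']
  exact pvJoin_pvSplit cs

-- ===== VERDICT (by name: the statement is the Claim_ definition above) =====
theorem dedent_spec : Claim_equal_dedent := by
  intro s itoken _
  unfold Spec_dedent
  apply String.toList_inj.mp
  rw [pvDedent_toList]
  unfold dedent_alt
  by_cases h0 : PySem.Str.len itoken == 0 || PySem.Str.isIn "\n" itoken
  · rw [if_pos h0]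
    rcases Bool.or_eq_true_iff.mp h0 with h | h
    · -- empty token: every line is kept unchanged
      have ht : itoken.toList = [] := by
        have := beq_iff_eq.mp h
        rw [PySem.Str.len] at this
        exact List.length_eq_zero_iff.mp (by exact_mod_cast this)
      apply pvId_of_no_strip
      intro l _
      unfold pvF
      rw [ht]
      simp [List.isPrefixOf]
    · -- token contains '\n': it never prefixes a newline-free line
      have ht : '\n' ∈ itoken.toList := by
        have := (PySem.Chars.isIn_iff_infix _ _).mp h
        have hs : ("\n" : String).toList = ['\n'] := by decide
        rw [PySem.Str.isIn] at h
        rw [hs] at this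
        exact this.mem List.mem_cons_self
      apply pvId_of_no_strip
      intro l hl
      unfold pvF
      rw [if_neg (fun hp => pvSplit_no_nl s.toList l hl
        ((List.isPrefixOf_iff_prefix.mp hp).mem ht))]
  · rw [if_neg h0]
    simp only [Bool.or_eq_true, not_or] at h0
    obtain ⟨hlen, hnotin⟩ := h0
    have htne : itoken.toList ≠ [] := by
      intro hq
      apply hlen
      rw [PySem.Str.len]
      simp [hq]
    have hnl : '\n' ∉ itoken.toList := by
      intro hq
      apply hnotin
      rw [PySem.Str.isIn]
      apply (PySem.Chars.isIn_iff_infix _ _).mpr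
      have hs : ("\n" : String).toList = ['\n'] := by decide
      rw [hs]
      obtain ⟨u, v, huv⟩ := List.append_of_mem hq
      exact ⟨u, v, by rw [huv]; simp⟩
    rw [PySem.Str.toList_replace]
    have hhead : (if PySem.Str.startswith s itoken then
        PySem.Str.slice s (some (PySem.Str.len itoken)) none else s).toList
        = pvF itoken.toList s.toList := pvLineG_toList s itoken
    rw [hhead]
    have hold : ("\n" ++ itoken).toList = '\n' :: itoken.toList := by
      simp
    have hnewl : ("\n" : String).toList = ['\n'] := by decide
    rw [hold, hnewl]
    unfold PySem.Chars.replace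
    rw [if_neg (by simp)]
    rw [pvReplace_go_spec itoken.toList hnl _ _ [] (le_refl _)]
    rw [pvSplit_strip itoken.toList s.toList hnl]
    cases hs : pvSplit s.toList with
    | nil => exact absurd hs (pvSplit_ne_nil s.toList)
    | cons a as =>
      simp only [List.modifyHead_cons, pvJoinTail, List.map_cons, List.reverse_nil,
        List.nil_append]
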